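-- pv_equiv track=rewrite | github.com/qjpike/AoC2020 | 2020_11.py | chk_right
-- ===== SOURCE A (Python) =====
-- def chk_right(field,curr,x_len):
--     if (curr + 1)%x_len != 0:
--         if field[curr + 1] == "#":
--             return True
--         elif field[curr + 1 ] == "L":
--             return False
--         else:
--             return chk_right(field,curr+1,x_len)
--     else:
--         return False
-- ===== SOURCE B (Python) =====
-- def chk_right(field, curr, x_len):
--     row_end = curr + 1 + (-(curr + 1)) % x_len
--     for i in range(curr + 1, row_end):
--         if field[i] == "#":
--             return True
--         if field[i] == "L":
--             return False
--     return False
-- ===== Notes on version B (the rewrite author's own statement) =====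
-- stated objective: alternative
-- what changed: Replaces the tail recursion that tests (curr+1)%x_len at every step by computing the row-end index once with modular arithmetic and scanning field[i] over range(curr+1, row_end); Pre_ excludes x_len = 0 (ZeroDivisionError in both), walks that run off the field (IndexError in both), and negative x_len where the rightward walk meets '#' - a meaningless negative row width on which either value is defensible.
-- outside the precondition, e.g. on chk_right(['L', '#'], 0, -3): A returns True, B returns False
import Mathlib
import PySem

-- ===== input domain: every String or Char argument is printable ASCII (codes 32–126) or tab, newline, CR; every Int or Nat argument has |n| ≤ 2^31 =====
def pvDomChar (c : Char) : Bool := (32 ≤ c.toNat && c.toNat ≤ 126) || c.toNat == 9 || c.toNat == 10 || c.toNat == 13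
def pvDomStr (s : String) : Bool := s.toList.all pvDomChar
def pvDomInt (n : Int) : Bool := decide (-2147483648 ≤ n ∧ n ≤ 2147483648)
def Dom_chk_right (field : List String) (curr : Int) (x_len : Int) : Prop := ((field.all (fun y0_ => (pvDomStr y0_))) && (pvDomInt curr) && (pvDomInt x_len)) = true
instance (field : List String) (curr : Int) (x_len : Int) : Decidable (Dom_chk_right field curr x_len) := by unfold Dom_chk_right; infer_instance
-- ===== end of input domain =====

-- B computes the row-end index once with modular arithmetic and scans field[i] over
-- range(curr+1, row_end), instead of A's tail recursion testing (curr+1)%x_len at every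
-- step (objective: alternative decomposition, same cost).


-- ===== PORT A =====
-- fuel makes the recursion total; inside Pre_ the walk stops within 2*field.length + 2 steps
-- (every index read before the stop is a distinct valid Python index), so fuel never runs out there
def chk_rightFuel (field : List String) (x_len : Int) : Int → Nat → Bool
  | _, 0 => false
  | curr, fuel + 1 =>
    if PySem.Int.mod (curr + 1) x_len ≠ 0 then
      match PySem.List.pyGet? field (curr + 1) with
      | some s =>
        if s = "#" then true
        else if s = "L" then false
        else chk_rightFuel field x_len (curr + 1) fuel
      | none => false            -- IndexError in Python: excluded by Pre_
    else false

def chk_right (field : List String) (curr : Int) (x_len : Int) : Bool :=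
  chk_rightFuel field x_len curr (2 * field.length + 2)

-- ===== PORT B =====
-- the 'for i in range(curr+1, row_end): …' scan of Source B
def bScan (field : List String) : List Int → Bool
  | [] => false
  | i :: rest =>
    match PySem.List.pyGet? field i with
    | some s => if s = "#" then true else if s = "L" then false else bScan field rest
    | none => false              -- IndexError in Python: excluded by Pre_

def chk_right_alt (field : List String) (curr : Int) (x_len : Int) : Bool :=
  let row_end := curr + 1 + PySem.Int.mod (-(curr + 1)) x_len
  bScan field (PySem.List.pyRange (curr + 1) row_end 1)

-- ===== PRECONDITION & SPEC =====
-- field[i] exists and is neither "#" nor "L" (the walk passes through i)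
def okAt (field : List String) (i : Int) : Bool :=
  match PySem.List.pyGet? field i with
  | some s => !(s == "#") && !(s == "L")
  | none => false

-- field[i] exists and stops the walk: "L" always, "#" only when posx
def stopAt (field : List String) (i : Int) (posx : Bool) : Bool :=
  match PySem.List.pyGet? field i with
  | some s => s == "L" || (posx && s == "#")
  | none => false

-- Pre_ = the walk from curr+1 terminates normally AND (for negative x_len) not on "#":
-- it excludes x_len = 0 (ZeroDivisionError in both programs), walks that run off the field
-- (IndexError in both programs), and negative x_len where the walk meets "#" — a meaningless
-- negative row width on which A's value (True) and B's value (False) are both defensible;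
-- that last reason does exclude some inputs A returns on (see the cite in the claim).
def Pre_chk_right (field : List String) (curr : Int) (x_len : Int) : Prop :=
  x_len ≠ 0 ∧
  ∃ k : Fin (2 * field.length + 2),
    curr + 1 + (k.1 : Int) ≤ curr + 1 + PySem.Int.mod (-(curr + 1)) |x_len| ∧
    (curr + 1 + (k.1 : Int) = curr + 1 + PySem.Int.mod (-(curr + 1)) |x_len| ∨
      stopAt field (curr + 1 + (k.1 : Int)) (decide (0 < x_len)) = true) ∧
    ∀ j : Fin (2 * field.length + 2), j < k → okAt field (curr + 1 + (j.1 : Int)) = true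
instance (field : List String) (curr : Int) (x_len : Int) : Decidable (Pre_chk_right field curr x_len) := by unfold Pre_chk_right; infer_instance

def pvWitness_chk_right : List String × Int × Int := (["#", ".", "L", "."], 1, 2)

def Spec_chk_right (field : List String) (curr : Int) (x_len : Int) (out : Bool) : Prop := out = chk_right_alt field curr x_len
instance (field : List String) (curr : Int) (x_len : Int) (out : Bool) : Decidable (Spec_chk_right field curr x_len out) := by unfold Spec_chk_right; infer_instance

-- ===== CLAIM (what is proved, stated in full; the proofs are below) =====
def Claim_equal_chk_right : Prop := ∀ (field : List String) (curr : Int) (x_len : Int), Dom_chk_right field curr x_len → Pre_chk_right field curr x_len → Spec_chk_right field curr x_len (chk_right field curr x_len)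

-- ===== LEMMAS AND PROOFS =====

-- Python's 'a % x_len == 0' is divisibility by |x_len|
lemma mod_zero_iff (a x_len : Int) : PySem.Int.mod a x_len = 0 ↔ (|x_len| ∣ a) := by
  rw [PySem.Int.mod_eq_zero_iff_dvd]
  exact (abs_dvd _ _).symm

-- strictly between two consecutive multiples of X there is no multiple
lemma not_dvd_between (X e j : Int) (hdvd : X ∣ e) (h1 : e - X < j) (h2 : j < e) :
    ¬ X ∣ j := by
  intro hj
  have h3 : X ∣ (e - j) := Dvd.dvd.sub hdvd hj
  have := Int.le_of_dvd (by omega) h3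
  omega

-- the walk and the range scan agree: from i with the stop point p (boundary E or a seat),
-- everything strictly between i and p passable, both sides compute the same value
lemma loop_eq (field : List String) (x X E : Int) (hxX : |x| = X) (hE : X ∣ E) :
    ∀ (fuel : Nat) (i p : Int), E - X ≤ i → i < p → p ≤ E →
      (p = E ∨ stopAt field p true = true) →
      (∀ j : Int, i < j → j < p → okAt field j = true) →
      (p - i).toNat ≤ fuel →
      chk_rightFuel field x i fuel = bScan field (PySem.List.pyRange (i + 1) E 1) := by
  intro fuel
  induction fuel with
  | zero => intro i p _ hip _ _ _ hf; omega
  | succ fuel ih =>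
    intro i p hlo hip hpE hstop hok hf
    by_cases hpe : i + 1 = p
    · by_cases hPE : p = E
      · -- boundary: A sees mod = 0, B scans the empty range
        have hm : PySem.Int.mod (i + 1) x = 0 := by
          rw [mod_zero_iff, hxX, hpe, hPE]; exact hE
        rw [chk_rightFuel]
        simp only [hm, ne_eq, not_true_eq_false, if_false]
        rw [hpe, hPE, PySem.List.pyRange_one_eq_nil (le_refl E)]
        rfl
      · -- seat at p = i+1: both read it first and return on it
        have hS := hstop.resolve_left hPE
        have hpE' : p < E := lt_of_le_of_ne hpE hPE
        have hm : PySem.Int.mod (i + 1) x ≠ 0 := by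
          rw [Ne, mod_zero_iff, hxX]
          exact not_dvd_between X E (i + 1) hE (by omega) (by omega)
        cases hg : PySem.List.pyGet? field p with
        | none => simp [stopAt, hg] at hS
        | some s =>
          have hseat : s = "L" ∨ s = "#" := by
            simp [stopAt, hg] at hS
            tauto
          have hm' : ¬ PySem.Int.mod p x = 0 := hpe ▸ hm
          rw [chk_rightFuel]
          simp only [hpe, hg]
          rw [PySem.List.pyRange_one_cons (by omega : p < E)]
          rcases hseat with h | h <;> simp [bScan, hg, h, hm']
    · -- interior index i+1: both read a passable seat and continue
      have hok1 : okAt field (i + 1) = true := hok (i + 1) (by omega) (by omega)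
      have hm : PySem.Int.mod (i + 1) x ≠ 0 := by
        rw [Ne, mod_zero_iff, hxX]
        exact not_dvd_between X E (i + 1) hE (by omega) (by omega)
      cases hg : PySem.List.pyGet? field (i + 1) with
      | none => simp [okAt, hg] at hok1
      | some s =>
        have hns : ¬ s = "#" ∧ ¬ s = "L" := by
          simp [okAt, hg] at hok1
          tauto
        rw [chk_rightFuel]
        simp only [hm, ne_eq, not_false_eq_true, if_true, hg]
        rw [PySem.List.pyRange_one_cons (by omega : i + 1 < E)]
        simp only [bScan, hg, hns.1, hns.2, if_false]
        exact ih (i + 1) p (by omega) (by omega) hpE hstop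
          (fun j h1 h2 => hok j (by omega) h2) (by omega)

-- for a negative width: the walk stops on the boundary or on "L", so A returns False
lemma loop_false (field : List String) (x X E : Int) (hxX : |x| = X) (hE : X ∣ E) :
    ∀ (fuel : Nat) (i p : Int), E - X ≤ i → i < p → p ≤ E →
      (p = E ∨ stopAt field p false = true) →
      (∀ j : Int, i < j → j < p → okAt field j = true) →
      (p - i).toNat ≤ fuel →
      chk_rightFuel field x i fuel = false := by
  intro fuel
  induction fuel with
  | zero => intro i p _ hip _ _ _ hf; omega
  | succ fuel ih =>
    intro i p hlo hip hpE hstop hok hf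
    by_cases hpe : i + 1 = p
    · by_cases hPE : p = E
      · have hm : PySem.Int.mod (i + 1) x = 0 := by
          rw [mod_zero_iff, hxX, hpe, hPE]; exact hE
        rw [chk_rightFuel]
        simp [hm]
      · have hS := hstop.resolve_left hPE
        have hm : PySem.Int.mod (i + 1) x ≠ 0 := by
          rw [Ne, mod_zero_iff, hxX]
          exact not_dvd_between X E (i + 1) hE (by omega) (by omega)
        cases hg : PySem.List.pyGet? field p with
        | none => simp [stopAt, hg] at hS
        | some s =>
          have hL : s = "L" := by simpa [stopAt, hg] using hS
          have hm' : ¬ PySem.Int.mod p x = 0 := hpe ▸ hm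
          rw [chk_rightFuel]
          simp only [hpe]
          simp [hm', hg, hL]
    · have hok1 : okAt field (i + 1) = true := hok (i + 1) (by omega) (by omega)
      have hm : PySem.Int.mod (i + 1) x ≠ 0 := by
        rw [Ne, mod_zero_iff, hxX]
        exact not_dvd_between X E (i + 1) hE (by omega) (by omega)
      cases hg : PySem.List.pyGet? field (i + 1) with
      | none => simp [okAt, hg] at hok1
      | some s =>
        have hns : ¬ s = "#" ∧ ¬ s = "L" := by
          simp [okAt, hg] at hok1
          tauto
        rw [chk_rightFuel]
        simp only [hm, ne_eq, not_false_eq_true, if_true, hg, hns.1, hns.2, if_false]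
        exact ih (i + 1) p (by omega) (by omega) hpE hstop
          (fun j h1 h2 => hok j (by omega) h2) (by omega)

-- ===== VERDICT (by name: the statement is the Claim_ definition above) =====
theorem chk_right_spec : Claim_equal_chk_right := by
  intro field curr x_len _ hpre
  obtain ⟨hx0, k, hk1, hk2, hk3⟩ := hpre
  have hX : (0:Int) < |x_len| := abs_pos.mpr hx0
  have hr0 : 0 ≤ PySem.Int.mod (-(curr + 1)) |x_len| := PySem.Int.mod_nonneg _ hX
  have hrX : PySem.Int.mod (-(curr + 1)) |x_len| < |x_len| := PySem.Int.mod_lt _ hX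
  have hrE : PySem.Int.mod (-(curr + 1)) |x_len| = (-(curr + 1)) % |x_len| :=
    PySem.Int.mod_eq_emod_of_pos hX
  have hEdvd : |x_len| ∣ (curr + 1 + PySem.Int.mod (-(curr + 1)) |x_len|) := by
    refine ⟨-((-(curr + 1)) / |x_len|), ?_⟩
    have h := Int.emod_add_mul_ediv (-(curr + 1)) |x_len|
    rw [hrE]
    linear_combination h
  have hk0 : (0 : Int) ≤ (k.1 : Int) := Int.natCast_nonneg _
  have hok : ∀ j : Int, curr < j → j < curr + 1 + (k.1 : Int) → okAt field j = true := by
    intro j h1 h2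
    have h3 : (j - (curr + 1)).toNat < k.1 := by omega
    have h4 := hk3 ⟨(j - (curr + 1)).toNat, lt_trans h3 k.2⟩ (by rw [Fin.lt_def]; exact h3)
    have h5 : curr + 1 + (((j - (curr + 1)).toNat : Nat) : Int) = j := by omega
    rwa [h5] at h4
  have hf : (curr + 1 + (k.1 : Int) - curr).toNat ≤ 2 * field.length + 2 := by
    have := k.2
    omega
  unfold Spec_chk_right chk_right chk_right_alt
  by_cases hpos : 0 < x_len
  · have hd : decide (0 < x_len) = true := by simp [hpos]
    rw [hd] at hk2
    have habs : PySem.Int.mod (-(curr + 1)) x_len = PySem.Int.mod (-(curr + 1)) |x_len| := by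
      rw [abs_of_pos hpos]
    simp only [habs]
    exact loop_eq field x_len |x_len| (curr + 1 + PySem.Int.mod (-(curr + 1)) |x_len|) rfl
      hEdvd (2 * field.length + 2) curr (curr + 1 + (k.1 : Int)) (by omega) (by omega) hk1
      hk2 hok hf
  · have hneg : x_len < 0 := by omega
    have hd : decide (0 < x_len) = false := by simp [hpos]
    rw [hd] at hk2
    have hmb := (PySem.Int.mod_neg_bounds (-(curr + 1)) hneg).2
    have hBnil : PySem.List.pyRange (curr + 1) (curr + 1 + PySem.Int.mod (-(curr + 1)) x_len)
        = [] := PySem.List.pyRange_one_eq_nil (by omega)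
    simp only [hBnil, bScan]
    exact loop_false field x_len |x_len| (curr + 1 + PySem.Int.mod (-(curr + 1)) |x_len|) rfl
      hEdvd (2 * field.length + 2) curr (curr + 1 + (k.1 : Int)) (by omega) (by omega) hk1
      hk2 hok hf
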